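-- pv_equiv track=rewrite | github.com/21104988d/backtest | eth_btc_stat_arb/rolling_beta_stat_arb.py | holding_durations
-- ===== SOURCE A (Python) =====
-- def holding_durations(position):
--     durs = []
--     side = 0
--     bars = 0
--     for p in position:
--         if p == 0:
--             if side != 0:
--                 durs.append(bars)
--                 side = 0
--                 bars = 0
--             continue
--         if side == 0:
--             side = p
--             bars = 1
--             continue
--         if p == side:
--             bars += 1
--             continue
--         durs.append(bars)
--         side = p
--         bars = 1
--     if side != 0:
--         durs.append(bars)
--     return durs
-- ===== SOURCE B (Python) =====
-- def holding_durations(position):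
--     n = len(position)
--     starts = [i for i in range(n) if i == 0 or position[i] != position[i - 1]]
--     ends = starts[1:] + [n]
--     return [e - s for s, e in zip(starts, ends) if position[s] != 0]
-- ===== Notes on version B (the rewrite author's own statement) =====
-- stated objective: alternative
-- what changed: Instead of a per-element (side, bars) state machine, B finds the indices where a new run starts by comparing each element with its predecessor, then emits each duration as the difference between consecutive start indices (with len(position) closing the last run), filtering out runs that start at a zero.
import Mathlib
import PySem

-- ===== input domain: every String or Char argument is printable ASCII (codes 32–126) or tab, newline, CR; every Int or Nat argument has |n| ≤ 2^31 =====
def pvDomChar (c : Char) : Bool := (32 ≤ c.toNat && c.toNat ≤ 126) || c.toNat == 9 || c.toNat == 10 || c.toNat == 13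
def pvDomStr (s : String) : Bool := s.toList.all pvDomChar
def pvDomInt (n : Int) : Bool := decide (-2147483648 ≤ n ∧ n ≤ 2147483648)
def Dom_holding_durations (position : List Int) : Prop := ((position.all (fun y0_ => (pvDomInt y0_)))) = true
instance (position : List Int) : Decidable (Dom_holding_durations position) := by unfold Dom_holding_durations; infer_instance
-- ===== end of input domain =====

-- B computes durations as differences of consecutive run-start indices (found by pairwise comparison)
-- instead of A's per-element (side, bars) state machine; same O(n) cost (objective: alternative).


-- ===== PORT A =====
-- literal port of A's loop: state = (durs, side, bars)
def hdStepA (st : List Int × Int × Int) (p : Int) : List Int × Int × Int :=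
  let durs := st.1; let side := st.2.1; let bars := st.2.2
  if p = 0 then
    if side ≠ 0 then (durs ++ [bars], 0, 0) else (durs, side, bars)
  else if side = 0 then (durs, p, 1)
  else if p = side then (durs, side, bars + 1)
  else (durs ++ [bars], p, 1)

def holding_durations (position : List Int) : List Int :=
  let st := position.foldl hdStepA ([], 0, 0)
  if st.2.1 ≠ 0 then st.1 ++ [st.2.2] else st.1

-- ===== PORT B =====
-- port of B: run-start indices by pairwise comparison, durations = differences of consecutive starts.
-- position[i] / position[i-1] are ported with pyGetD (default unused: every index B reads is in range;
-- for i = 0 Python short-circuits 'i == 0 or …' and the || disjunct makes the pyGetD at -1 irrelevant).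
def holding_durations_alt (position : List Int) : List Int :=
  let n : Int := PySem.List.len position
  let starts := (PySem.List.pyRange 0 n 1).filter
    (fun i => i == 0 || PySem.List.pyGetD position i 0 != PySem.List.pyGetD position (i - 1) 0)
  let ends := PySem.List.slice starts (some 1) none ++ [n]
  ((starts.zip ends).filter (fun se => PySem.List.pyGetD position se.1 0 != 0)).map
    (fun se => se.2 - se.1)

-- ===== PRECONDITION & SPEC =====
def Spec_holding_durations (position : List Int) (out : List Int) : Prop := out = holding_durations_alt position
instance (position : List Int) (out : List Int) : Decidable (Spec_holding_durations position out) := by unfold Spec_holding_durations; infer_instance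

-- ===== CLAIM (what is proved, stated in full; the proofs are below) =====
def Claim_equal_holding_durations : Prop := ∀ (position : List Int), Dom_holding_durations position → Spec_holding_durations position (holding_durations position)

-- ===== LEMMAS AND PROOFS =====

-- Common reference: the list of run lengths of maximal nonzero runs, by structural run-peeling.
def hdRuns (l : List Int) : List Int :=
  match l with
  | [] => []
  | x :: xs =>
    let rest := xs.dropWhile (· == x)
    if x = 0 then hdRuns rest
    else ((xs.takeWhile (· == x)).length + 1 : Int) :: hdRuns rest
termination_by l.length
decreasing_by
  · have := List.length_dropWhile_le (· == x) xs; simp; omega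
  · have := List.length_dropWhile_le (· == x) xs; simp; omega

def hdFinish (st : List Int × Int × Int) : List Int :=
  if st.2.1 ≠ 0 then st.1 ++ [st.2.2] else st.1

theorem hdRuns_dropZeros (xs : List Int) :
    hdRuns (xs.dropWhile (· == (0 : Int))) = hdRuns xs := by
  cases xs with
  | nil => simp
  | cons x t =>
    by_cases hx : x = 0
    · subst hx
      rw [List.dropWhile_cons_of_pos (by simp)]
      conv_rhs => rw [hdRuns]
      simp
    · rw [List.dropWhile_cons_of_neg (by simp [hx])]

theorem hd_main (l : List Int) :
    ∀ (durs : List Int) (side bars : Int),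
      (side = 0 → hdFinish (l.foldl hdStepA (durs, side, bars)) = durs ++ hdRuns l) ∧
      (side ≠ 0 → hdFinish (l.foldl hdStepA (durs, side, bars)) =
        durs ++ ((bars + (l.takeWhile (· == side)).length) :: hdRuns (l.dropWhile (· == side)))) := by
  induction l with
  | nil =>
    intro durs side bars
    constructor
    · intro h; subst h; rw [hdRuns]; simp [hdFinish]
    · intro h
      simp only [List.foldl_nil, List.takeWhile_nil, List.dropWhile_nil]
      rw [hdRuns]
      simp [hdFinish, h]
  | cons x xs ih =>
    intro durs side bars
    constructor
    · intro h; subst h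
      by_cases hx : x = 0
      · subst hx
        have hstep : hdStepA (durs, (0 : Int), bars) 0 = (durs, 0, bars) := by
          simp [hdStepA]
        rw [List.foldl_cons, hstep, (ih durs 0 bars).1 rfl]
        conv_rhs => rw [hdRuns]
        simp [hdRuns_dropZeros]
      · have hstep : hdStepA (durs, (0 : Int), bars) x = (durs, x, 1) := by
          simp [hdStepA, hx]
        rw [List.foldl_cons, hstep, (ih durs x 1).2 hx]
        conv_rhs => rw [hdRuns]
        simp [hx]
        omega
    · intro hside
      by_cases hx : x = 0
      · subst hx
        have hstep : hdStepA (durs, side, bars) 0 = (durs ++ [bars], 0, 0) := by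
          simp [hdStepA, hside]
        rw [List.foldl_cons, hstep, (ih (durs ++ [bars]) 0 0).1 rfl]
        rw [List.takeWhile_cons_of_neg (by simp [Ne.symm hside]),
            List.dropWhile_cons_of_neg (by simp [Ne.symm hside])]
        conv_rhs => rw [hdRuns]
        simp [hdRuns_dropZeros]
      · by_cases hxs : x = side
        · subst hxs
          have hstep : hdStepA (durs, x, bars) x = (durs, x, bars + 1) := by
            simp [hdStepA, hx]
          rw [List.foldl_cons, hstep, (ih durs x (bars + 1)).2 hside]
          rw [List.takeWhile_cons_of_pos (by simp),
              List.dropWhile_cons_of_pos (by simp)]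
          simp
          omega
        · have hstep : hdStepA (durs, side, bars) x = (durs ++ [bars], x, 1) := by
            simp [hdStepA, hx, hside, hxs]
          rw [List.foldl_cons, hstep, (ih (durs ++ [bars]) x 1).2 hx]
          rw [List.takeWhile_cons_of_neg (by simp [hxs]),
              List.dropWhile_cons_of_neg (by simp [hxs])]
          conv_rhs => rw [hdRuns]
          simp [hx]
          omega

theorem a_eq_runs (l : List Int) : holding_durations l = hdRuns l := by
  unfold holding_durations
  have := (hd_main l [] 0 0).1 rfl
  simpa [hdFinish] using this

-- Nat-level restatement of B's pipeline
def hdStartsN (l : List Int) : List Nat :=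
  (List.range l.length).filter (fun i => i == 0 || l.getD i 0 != l.getD (i - 1) 0)

def hdOutN (l : List Int) : List Int :=
  (((hdStartsN l).zip ((hdStartsN l).tail ++ [l.length])).filter
      (fun se => l.getD se.1 0 != 0)).map
    (fun se => (se.2 : Int) - (se.1 : Int))

theorem b_eq_N (l : List Int) : holding_durations_alt l = hdOutN l := by
  simp only [holding_durations_alt, hdOutN]
  have hrange : PySem.List.pyRange 0 (PySem.List.len l) 1
      = (List.range l.length).map (fun k : Nat => (k : Int)) := by
    rw [PySem.List.pyRange_one]
    simp
  have hpred : ∀ k ∈ List.range l.length,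
      (((k : Int) == 0) || PySem.List.pyGetD l (k : Int) 0 != PySem.List.pyGetD l ((k : Int) - 1) 0)
      = ((k == 0) || l.getD k 0 != l.getD (k - 1) 0) := by
    intro k _
    by_cases hk0 : k = 0
    · subst hk0; simp
    · have h1 : (k : Int) - 1 = ((k - 1 : Nat) : Int) := by omega
      have e1 : ((k : Int) == 0) = false := by simpa using hk0
      have e2 : (k == 0) = false := by simpa using hk0
      simp [h1, e1, e2]
  have hstarts : (PySem.List.pyRange 0 (PySem.List.len l) 1).filter
      (fun i => i == 0 || PySem.List.pyGetD l i 0 != PySem.List.pyGetD l (i - 1) 0)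
      = (hdStartsN l).map (fun k : Nat => (k : Int)) := by
    rw [hrange, List.filter_map, hdStartsN]
    congr 1
    exact List.filter_congr hpred
  rw [hstarts, PySem.List.slice_from_one]
  have htail : ((hdStartsN l).map (fun k : Nat => (k : Int))).tail ++ [(PySem.List.len l : Int)]
      = ((hdStartsN l).tail ++ [l.length]).map (fun k : Nat => (k : Int)) := by
    simp [List.map_tail, PySem.List.len]
  rw [htail]
  have hzip : ((hdStartsN l).map (fun k : Nat => (k : Int))).zip
        (((hdStartsN l).tail ++ [l.length]).map (fun k : Nat => (k : Int)))
      = ((hdStartsN l).zip ((hdStartsN l).tail ++ [l.length])).map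
        (fun se => ((se.1 : Int), (se.2 : Int))) := by
    simpa [Prod.map] using
      (List.zip_map (f := fun k : Nat => (k : Int)) (g := fun k : Nat => (k : Int))
        (l₁ := hdStartsN l) (l₂ := (hdStartsN l).tail ++ [l.length]))
  have hfilter : List.filter ((fun se : Int × Int => PySem.List.pyGetD l se.1 0 != 0) ∘
        fun se : Nat × Nat => ((se.1 : Int), (se.2 : Int)))
      ((hdStartsN l).zip ((hdStartsN l).tail ++ [l.length]))
      = List.filter (fun se => l.getD se.1 0 != 0)
        ((hdStartsN l).zip ((hdStartsN l).tail ++ [l.length])) := by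
    apply List.filter_congr
    intro se _
    simp [Function.comp, List.getD_eq_getElem?_getD]
  rw [hzip, List.filter_map, List.map_map, hfilter]
  rfl

-- first run peeled off: start indices of x :: (t ++ r) where t is all x and r does not start with x
theorem startsN_peel (x : Int) (t r : List Int)
    (ht : ∀ y ∈ t, y = x) (hr : ∀ h : r ≠ [], r.head h ≠ x) :
    hdStartsN (x :: (t ++ r)) = 0 :: (hdStartsN r).map (fun j => t.length + 1 + j) := by
  set l := x :: (t ++ r) with hl
  set k := t.length with hk
  have hlen : l.length = (k + 1) + r.length := by simp [hl, hk]; omega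
  have hgetL : ∀ j, j < k + 1 → l.getD j 0 = x := by
    intro j hj
    have hj' : j < (x :: t).length := by simp; omega
    have hsplit : l = (x :: t) ++ r := by simp [hl]
    rw [hsplit, List.getD_append (x :: t) r 0 j hj', List.getD_eq_getElem (x :: t) 0 hj']
    rcases List.mem_cons.mp (List.getElem_mem hj') with h | h
    · exact h
    · exact ht _ h
  have hgetR : ∀ j, l.getD (k + 1 + j) 0 = r.getD j 0 := by
    intro j
    have hsplit : l = (x :: t) ++ r := by simp [hl]
    rw [hsplit, List.getD_append_right (x :: t) r 0 (k + 1 + j) (by simp [hk])]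
    congr 1
    simp [hk]
  conv_lhs => unfold hdStartsN
  rw [show l.length = (k + 1) + r.length from hlen, List.range_add, List.filter_append]
  have hfirst : (List.range (k + 1)).filter (fun i => i == 0 || l.getD i 0 != l.getD (i - 1) 0) = [0] := by
    rw [List.range_succ_eq_map, List.filter_cons]
    simp only [beq_self_eq_true, Bool.true_or, if_pos]
    have : (List.map Nat.succ (List.range k)).filter
        (fun i => i == 0 || l.getD i 0 != l.getD (i - 1) 0) = [] := by
      rw [List.filter_map, List.filter_eq_nil_iff.mpr, List.map_nil]
      intro i hi
      have hik : i < k := List.mem_range.mp hi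
      simp only [Function.comp, Nat.succ_eq_add_one]
      have h1 : l.getD (i + 1) 0 = x := hgetL _ (by omega)
      have h2 : l.getD (i + 1 - 1) 0 = x := hgetL _ (by omega)
      simp only [List.getD_eq_getElem?_getD] at h1 h2
      simp only [Nat.add_sub_cancel] at h2
      simp [h1, h2]
    rw [this]
  rw [hfirst]
  have hsecond : ((List.range r.length).map (fun j => k + 1 + j)).filter
      (fun i => i == 0 || l.getD i 0 != l.getD (i - 1) 0)
      = (hdStartsN r).map (fun j => k + 1 + j) := by
    rw [List.filter_map, hdStartsN]
    congr 1
    apply List.filter_congr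
    intro j hj
    have hjr : j < r.length := List.mem_range.mp hj
    simp only [Function.comp]
    have hL : l.getD (k + 1 + j) 0 = r.getD j 0 := hgetR j
    cases j with
    | zero =>
      have hrne : r ≠ [] := by intro h; rw [h] at hjr; simp at hjr
      have hhead : r.getD 0 0 = r.head hrne := by
        rw [List.getD_eq_getElem _ _ (by omega)]
        exact (List.head_eq_getElem hrne).symm
      have hmid : l.getD (k + 1 + 0 - 1) 0 = x := hgetL _ (by omega)
      have hne : r.getD 0 0 ≠ x := by rw [hhead]; exact hr hrne
      simp only [Nat.add_zero] at hL hmid ⊢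
      simp only [List.getD_eq_getElem?_getD] at hL hmid hne
      simp only [Nat.add_sub_cancel] at hmid
      simp [hL, hmid, hne]
    | succ m =>
      have hmid : l.getD (k + 1 + (m + 1) - 1) 0 = r.getD m 0 := by
        have : k + 1 + (m + 1) - 1 = k + 1 + m := by omega
        rw [this, hgetR]
      simp only [List.getD_eq_getElem?_getD] at hL hmid
      simp only [show k + 1 + (m + 1) - 1 = k + 1 + m from by omega] at hmid
      simp [hL, hmid]
  rw [hsecond]
  simp [hk]

theorem startsN_nonempty (r : List Int) (h : r ≠ []) :
    hdStartsN r = 0 :: (hdStartsN r).tail := by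
  unfold hdStartsN
  obtain ⟨y, r', rfl⟩ := List.exists_cons_of_ne_nil h
  rw [show (y :: r').length = r'.length + 1 from rfl, List.range_succ_eq_map, List.filter_cons]
  simp

theorem outN_peel (x : Int) (t r : List Int)
    (ht : ∀ y ∈ t, y = x) (hr : ∀ h : r ≠ [], r.head h ≠ x) :
    hdOutN (x :: (t ++ r))
      = (if x = 0 then [] else [((t.length + 1 : Nat) : Int)]) ++ hdOutN r := by
  set l := x :: (t ++ r) with hl
  set k := t.length with hk
  have hlen : l.length = (k + 1) + r.length := by simp [hl, hk]; omega
  have hget0 : l.getD 0 0 = x := by simp [hl]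
  have hgetR : ∀ j, l.getD (k + 1 + j) 0 = r.getD j 0 := by
    intro j
    have hsplit : l = (x :: t) ++ r := by simp [hl]
    rw [hsplit, List.getD_append_right (x :: t) r 0 (k + 1 + j) (by simp [hk])]
    congr 1
    simp [hk]
  have hstarts := startsN_peel x t r ht hr
  rw [← hk] at hstarts
  by_cases hrnil : r = []
  -- last run: the single pair (0, k+1)
  · subst hrnil
    have hstarts' : hdStartsN l = [0] := by
      have h0 : hdStartsN ([] : List Int) = [] := by simp [hdStartsN]
      rw [hl]
      simpa [h0] using hstarts
    have hget0' : l[0]?.getD 0 = x := by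
      simpa [List.getD_eq_getElem?_getD] using hget0
    unfold hdOutN
    rw [hstarts', hlen]
    by_cases hx : x = 0
    · simp [hx, hdStartsN, hget0']
    · simp [hx, hdStartsN, hget0']
  -- r nonempty: head pair (0, k+1), then r's pairs shifted by k+1
  · have hrc := startsN_nonempty r hrnil
    set rest := (hdStartsN r).tail with hrest
    have hstarts2 : hdStartsN l = 0 :: ((k + 1) :: rest.map (fun j => k + 1 + j)) := by
      rw [hstarts, hrc]
      simp
    have hpairs : (hdStartsN l).zip ((hdStartsN l).tail ++ [l.length])
        = (0, k + 1) :: ((hdStartsN r).zip (rest ++ [r.length])).map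
            (fun se => (k + 1 + se.1, k + 1 + se.2)) := by
      rw [hstarts2]
      simp only [List.tail_cons, List.cons_append, List.zip_cons_cons]
      congr 1
      have h1 : (k + 1) :: rest.map (fun j => k + 1 + j)
          = (0 :: rest).map (fun j => k + 1 + j) := by simp
      have h2 : rest.map (fun j => k + 1 + j) ++ [l.length]
          = (rest ++ [r.length]).map (fun j => k + 1 + j) := by simp [hlen]
      rw [h1, h2, hrc]
      simpa [Prod.map] using
        (List.zip_map (f := fun j => k + 1 + j) (g := fun j => k + 1 + j)
          (l₁ := 0 :: rest) (l₂ := rest ++ [r.length]))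
    unfold hdOutN
    rw [hpairs, List.filter_cons]
    have hfilt : List.filter (fun se => l.getD se.1 0 != 0)
          (List.map (fun se => (k + 1 + se.1, k + 1 + se.2))
            ((hdStartsN r).zip (rest ++ [r.length])))
        = List.map (fun se => (k + 1 + se.1, k + 1 + se.2))
            (List.filter (fun se => r.getD se.1 0 != 0)
              ((hdStartsN r).zip (rest ++ [r.length]))) := by
      rw [List.filter_map]
      congr 1
      apply List.filter_congr
      intro se _
      simp only [Function.comp]
      rw [hgetR]
    rw [hfilt]
    simp only [hget0]
    have hshift : ((fun se : Nat × Nat => (se.2 : Int) - (se.1 : Int)) ∘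
          (fun se : Nat × Nat => (k + 1 + se.1, k + 1 + se.2)))
        = (fun se : Nat × Nat => (se.2 : Int) - (se.1 : Int)) := by
      funext se
      simp only [Function.comp]
      push_cast
      ring
    by_cases hx : x = 0
    · simp [hx, List.map_map, hshift, hrest]
    · simp [hx, List.map_map, hshift, hrest]

theorem outN_eq_runs (l : List Int) : hdOutN l = hdRuns l := by
  induction hn : l.length using Nat.strong_induction_on generalizing l with
  | _ n ih =>
    cases l with
    | nil => simp [hdOutN, hdStartsN, hdRuns]
    | cons x xs =>
      have hsplit : xs = xs.takeWhile (· == x) ++ xs.dropWhile (· == x) :=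
        (List.takeWhile_append_dropWhile).symm
      have ht : ∀ y ∈ xs.takeWhile (· == x), y = x := by
        intro y hy
        simpa using List.mem_takeWhile_imp hy
      have hr : ∀ h : xs.dropWhile (· == x) ≠ [], (xs.dropWhile (· == x)).head h ≠ x := by
        intro h
        have := List.head_dropWhile_not (· == x) h
        simpa using this
      have hlt : (xs.dropWhile (· == x)).length < n := by
        have := List.length_dropWhile_le (· == x) xs
        subst hn; simp; omega
      have hIH := ih _ hlt (xs.dropWhile (· == x)) rfl
      calc hdOutN (x :: xs) = hdOutN (x :: (xs.takeWhile (· == x) ++ xs.dropWhile (· == x))) := by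
            rw [← hsplit]
        _ = (if x = 0 then [] else [(((xs.takeWhile (· == x)).length + 1 : Nat) : Int)])
              ++ hdOutN (xs.dropWhile (· == x)) := outN_peel x _ _ ht hr
        _ = hdRuns (x :: xs) := by
            rw [hIH, hdRuns]
            by_cases hx : x = 0
            · simp [hx]
            · simp [hx]

-- ===== VERDICT (by name: the statement is the Claim_ definition above) =====
theorem holding_durations_spec : Claim_equal_holding_durations := by
  intro position _
  unfold Spec_holding_durations
  rw [a_eq_runs, b_eq_N, outN_eq_runs]
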